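-- pv_equiv track=rewrite | github.com/yanniskatsaros/advent-of-code | python/2019/04/day4.py | validate_again
-- ===== SOURCE A (Python) =====
-- def validate_again(pwd: int) -> bool:
--     """
--     Additional validation required for Part 2
--     """
--     text = str(pwd)
--     d_prev = int(text[0])
--     streaks = []
--     streak = 1
--
--     for d in text[1:]:
--         d = int(d)
--         if d == d_prev:
--             streak += 1
--         else:
--             streaks.append(streak)
--             streak = 1
--         d_prev = d
--
--     streaks.append(streak)
--     return True if 2 in streaks else False
-- ===== SOURCE B (Python) =====
-- def validate_again(pwd: int) -> bool:
--     """
--     Part-2 check: some maximal run of equal adjacent digits of str(pwd)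
--     has length exactly 2, i.e. an isolated pair exists.  Instead of
--     accumulating run lengths, convert each character with int() (so a
--     negative pwd raises ValueError just like the original), pad the digit
--     list with a sentinel and scan sliding windows of four consecutive
--     values for an isolated pair in the middle.
--     """
--     digits = [int(c) for c in str(pwd)]
--     padded = [-1] + digits + [-1]
--     return any(b == c and a != b and c != d
--                for a, b, c, d in zip(padded, padded[1:], padded[2:], padded[3:]))
-- ===== Notes on version B (the rewrite author's own statement) =====
-- stated objective: alternative
-- what changed: Replaced the run-length-accumulator loop (build the list of streak lengths, then test 2 in it) with a sentinel-padded sliding window scan over four consecutive digits that looks directly for an isolated pair of equal adjacent digits.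
import Mathlib
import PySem

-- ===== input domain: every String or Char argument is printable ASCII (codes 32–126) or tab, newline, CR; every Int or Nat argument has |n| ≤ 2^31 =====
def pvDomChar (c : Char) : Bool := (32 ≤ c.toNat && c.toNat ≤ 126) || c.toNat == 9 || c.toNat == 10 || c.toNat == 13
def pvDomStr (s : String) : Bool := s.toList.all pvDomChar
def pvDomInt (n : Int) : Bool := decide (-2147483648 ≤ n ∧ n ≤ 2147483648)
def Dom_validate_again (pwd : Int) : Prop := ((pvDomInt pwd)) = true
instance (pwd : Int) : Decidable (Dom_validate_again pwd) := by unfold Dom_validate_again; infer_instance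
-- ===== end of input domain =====

-- B replaces A's run-length accumulator with a sentinel-padded sliding window scan over four
-- consecutive digit values, looking directly for an isolated pair (objective: alternative
-- decomposition, same single pass; both raise on negative pwd, which Pre_ excludes).
-- ===== PORT A =====
-- int(ch) of a single digit character (exact on '0'..'9'; Pre_ keeps the input there)
def pvDigit (c : Char) : Int := (c.toNat : Int) - 48

-- the for-loop of A: state (d_prev, streaks, streak), then the final append
def pvLoopA (p : Int) (ss : List Int) (k : Int) : List Char → List Int
  | [] => ss ++ [k]
  | c :: cs =>
      let d := pvDigit c
      if d = p then pvLoopA d ss (k + 1) cs else pvLoopA d (ss ++ [k]) 1 cs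

def validate_again (pwd : Int) : Bool :=
  match (PySem.Int.toStr pwd).toList with
  | [] => false   -- unreachable: str(pwd) is never empty
  | c :: cs => (pvLoopA (pvDigit c) [] 1 cs).contains 2

-- ===== PORT B =====
-- the generator's test on one window (a, b, c, d)
def pvWin (w : Int × Int × Int × Int) : Bool :=
  w.2.1 == w.2.2.1 && w.1 != w.2.1 && w.2.2.1 != w.2.2.2

def validate_again_alt (pwd : Int) : Bool :=
  let digits := (PySem.Int.toStr pwd).toList.map pvDigit
  let padded := (-1 : Int) :: digits ++ [-1]
  ((padded.zip ((padded.drop 1).zip ((padded.drop 2).zip (padded.drop 3)))).any pvWin)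

-- ===== PRECONDITION & SPEC =====
-- Pre_ excludes negative pwd: there str(pwd) starts with '-' and int(text[0]) raises ValueError
-- (in both A and B).
def Pre_validate_again (pwd : Int) : Prop := 0 ≤ pwd
instance (pwd : Int) : Decidable (Pre_validate_again pwd) := by unfold Pre_validate_again; infer_instance
def pvWitness_validate_again : Int := (112233)

def Spec_validate_again (pwd : Int) (out : Bool) : Prop := out = validate_again_alt pwd
instance (pwd : Int) (out : Bool) : Decidable (Spec_validate_again pwd out) := by unfold Spec_validate_again; infer_instance

-- ===== CLAIM (what is proved, stated in full; the proofs are below) =====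
def Claim_equal_validate_again : Prop := ∀ (pwd : Int), Dom_validate_again pwd → Pre_validate_again pwd → Spec_validate_again pwd (validate_again pwd)

-- ===== LEMMAS AND PROOFS =====

-- A's loop, re-expressed on characters (pvDigit is injective)
def cLoop (p : Char) (ss : List Int) (k : Int) : List Char → List Int
  | [] => ss ++ [k]
  | c :: cs => if c = p then cLoop c ss (k + 1) cs else cLoop c (ss ++ [k]) 1 cs

theorem pvDigit_inj (a b : Char) : pvDigit a = pvDigit b ↔ a = b := by
  unfold pvDigit
  constructor
  · intro h
    have h2 : a.toNat = b.toNat := by omega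
    exact Char.ext (UInt32.toNat_inj.mp h2)
  · intro h; rw [h]

theorem pvLoopA_eq_cLoop (cs : List Char) (p : Char) (ss : List Int) (k : Int) :
    pvLoopA (pvDigit p) ss k cs = cLoop p ss k cs := by
  induction cs generalizing p ss k with
  | nil => rfl
  | cons c cs ih =>
      simp only [pvLoopA, cLoop, pvDigit_inj]
      split <;> exact ih ..

-- the run-length recursion that decides "some run of p^k ++ ds has length exactly 2"
def F (p : Char) (k : Int) : List Char → Bool
  | [] => decide (k = 2)
  | d :: ds => if d = p then F p (k + 1) ds else (decide (k = 2) || F d 1 ds)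

theorem cLoop_contains_two (ds : List Char) (p : Char) (ss : List Int) (k : Int) :
    (cLoop p ss k ds).contains 2 = (ss.contains 2 || F p k ds) := by
  induction ds generalizing p ss k with
  | nil => simp [cLoop, F, List.contains_eq_mem, eq_comm]
  | cons d ds ih =>
      simp only [cLoop, F]
      split
      · next h => subst h; rw [ih]
      · next h =>
          rw [ih]
          simp [List.contains_eq_mem, Bool.or_assoc, eq_comm]

-- the window scan after the first three elements are in hand
def Waux (a b c : Int) : List Int → Bool
  | [] => false
  | d :: ds => pvWin (a, b, c, d) || Waux b c d ds

theorem zip_any_eq_Waux (rest : List Int) (a b c : Int) :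
    (((a :: b :: c :: rest).zip
        ((b :: c :: rest).zip ((c :: rest).zip rest))).any pvWin) = Waux a b c rest := by
  induction rest generalizing a b c with
  | nil => simp [Waux]
  | cons d rest ih => simpa [Waux] using congrArg (pvWin (a, b, c, d) || ·) (ih b c d)

-- the core correspondence: window state (a, b, pvDigit p) abstracts run state (p, k)
theorem Waux_eq_F (ds : List Char) (a b : Int) (p : Char) (k : Int)
    (hp : pvDigit p ≠ -1) (hds : ∀ x ∈ ds, pvDigit x ≠ -1)
    (hk : 0 < k)
    (h1 : k = 1 → b ≠ pvDigit p)
    (h2 : k = 2 → b = pvDigit p ∧ a ≠ pvDigit p)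
    (h3 : 3 ≤ k → b = pvDigit p ∧ a = pvDigit p) :
    Waux a b (pvDigit p) (ds.map pvDigit ++ [-1]) = F p k ds := by
  induction ds generalizing a b p k with
  | nil =>
      simp only [List.map_nil, List.nil_append, Waux, F, pvWin, Bool.or_false]
      by_cases hk2 : k = 2
      · obtain ⟨hb, ha⟩ := h2 hk2
        subst hb
        simp [ha, hp, hk2, bne_iff_ne]
      · rcases (by omega : k = 1 ∨ 3 ≤ k) with h | h
        · have := h1 h
          simp [hk2, this]
        · obtain ⟨hb, ha⟩ := h3 h
          subst hb
          simp [ha, hk2]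
  | cons d ds ih =>
      have hd : pvDigit d ≠ -1 := hds d (by simp)
      have hds' : ∀ x ∈ ds, pvDigit x ≠ -1 := fun x hx => hds x (by simp [hx])
      simp only [List.map_cons, List.cons_append, Waux, F]
      by_cases hdp : d = p
      · subst hdp
        have hwin : pvWin (a, b, pvDigit d, pvDigit d) = false := by simp [pvWin]
        rw [hwin, Bool.false_or, if_pos rfl]
        refine ih b (pvDigit d) d (k + 1) hp hds' (by omega) (by omega) ?_ ?_
        · intro hk2
          exact ⟨rfl, h1 (by omega)⟩
        · intro hk3
          refine ⟨rfl, ?_⟩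
          rcases (by omega : k = 2 ∨ 3 ≤ k) with h | h
          · exact (h2 h).1
          · exact (h3 h).1
      · rw [if_neg hdp]
        have hdp' : pvDigit d ≠ pvDigit p := fun h => hdp ((pvDigit_inj d p).mp h)
        have hwin : pvWin (a, b, pvDigit p, pvDigit d) = (decide (k = 2)) := by
          by_cases hk2 : k = 2
          · obtain ⟨hb, ha⟩ := h2 hk2
            subst hb
            simp [pvWin, ha, hk2, Ne.symm hdp', bne_iff_ne]
          · rcases (by omega : k = 1 ∨ 3 ≤ k) with h | h
            · have := h1 h
              simp [pvWin, this, hk2, bne_iff_ne]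
            · obtain ⟨hb, ha⟩ := h3 h
              subst hb
              simp [pvWin, ha, hk2]
        rw [hwin]
        have := ih b (pvDigit p) d 1 hd hds' (by omega)
          (fun _ => Ne.symm hdp') (by omega) (by omega)
        rw [this]

-- digit values of str(pwd) are never the -1 sentinel
theorem digitChar_pvDigit_ne (m : Nat) : pvDigit (Nat.digitChar m) ≠ -1 := by
  have : Nat.digitChar m ≠ '/' := by
    rcases Nat.lt_or_ge m 16 with h | h
    · interval_cases m <;> decide
    · unfold Nat.digitChar
      rw [if_neg (by omega : ¬ m = 0), if_neg (by omega : ¬ m = 1),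
          if_neg (by omega : ¬ m = 2), if_neg (by omega : ¬ m = 3),
          if_neg (by omega : ¬ m = 4), if_neg (by omega : ¬ m = 5),
          if_neg (by omega : ¬ m = 6), if_neg (by omega : ¬ m = 7),
          if_neg (by omega : ¬ m = 8), if_neg (by omega : ¬ m = 9),
          if_neg (by omega : ¬ m = 10), if_neg (by omega : ¬ m = 11),
          if_neg (by omega : ¬ m = 12), if_neg (by omega : ¬ m = 13),
          if_neg (by omega : ¬ m = 14), if_neg (by omega : ¬ m = 15)]
      decide
  intro h
  apply this
  have h47 : (Nat.digitChar m).toNat = 47 := by unfold pvDigit at h; omega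
  exact Char.ext (UInt32.toNat_inj.mp (h47.trans rfl))

theorem mem_toDigitsCore_ne (b f : Nat) :
    ∀ (n : Nat) (ds : List Char), (∀ x ∈ ds, pvDigit x ≠ -1) →
      ∀ x ∈ Nat.toDigitsCore b f n ds, pvDigit x ≠ -1 := by
  induction f with
  | zero => intro n ds hds x hx; exact hds x hx
  | succ f ih =>
      intro n ds hds x hx
      rw [Nat.toDigitsCore] at hx
      have hcons : ∀ y ∈ (Nat.digitChar (n % b) :: ds), pvDigit y ≠ -1 := by
        intro y hy
        rcases List.mem_cons.mp hy with h | h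
        · subst h; exact digitChar_pvDigit_ne _
        · exact hds y h
      split at hx
      · exact hcons x hx
      · exact ih (n / b) _ hcons x hx

theorem toChars_ne (pwd : Int) (h : 0 ≤ pwd) :
    ∀ x ∈ (PySem.Int.toStr pwd).toList, pvDigit x ≠ -1 := by
  rw [PySem.Int.toList_toStr]
  unfold PySem.Int.toChars
  rw [if_neg (by omega)]
  exact mem_toDigitsCore_ne 10 _ _ [] (by simp)

-- ===== VERDICT (by name: the statement is the Claim_ definition above) =====
theorem validate_again_spec : Claim_equal_validate_again := by
  intro pwd _ hpre
  unfold Spec_validate_again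
  have hnul := toChars_ne pwd hpre
  cases hcs : (PySem.Int.toStr pwd).toList with
  | nil => simp [validate_again, validate_again_alt, hcs]
  | cons c cs =>
      rw [hcs] at hnul
      have hc : pvDigit c ≠ -1 := hnul c (by simp)
      cases cs with
      | nil => simp [validate_again, validate_again_alt, hcs, pvLoopA,
          List.contains_eq_mem, Waux]
      | cons d rest =>
          have hd : pvDigit d ≠ -1 := hnul d (by simp)
          have hrest : ∀ x ∈ rest, pvDigit x ≠ -1 := fun x hx => hnul x (by simp [hx])
          simp only [validate_again, validate_again_alt, hcs]
          rw [pvLoopA_eq_cLoop, cLoop_contains_two]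
          simp only [List.contains_nil, Bool.false_or]
          simp only [List.map_cons, List.cons_append, List.drop_succ_cons, List.drop_zero]
          rw [zip_any_eq_Waux (rest.map pvDigit ++ [-1]) (-1) (pvDigit c) (pvDigit d)]
          simp only [F]
          by_cases hdc : d = c
          · subst hdc
            rw [if_pos rfl]
            exact (Waux_eq_F rest (-1) (pvDigit d) d 2 hd hrest (by omega)
              (by omega) (fun _ => ⟨rfl, Ne.symm hd⟩) (by omega)).symm
          · rw [if_neg hdc]
            have hdc' : pvDigit d ≠ pvDigit c := fun h => hdc ((pvDigit_inj d c).mp h)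
            rw [show (decide ((1:Int) = 2)) = false from rfl, Bool.false_or]
            exact (Waux_eq_F rest (-1) (pvDigit c) d 1 hd hrest (by omega)
              (fun _ => Ne.symm hdc') (by omega) (by omega)).symm
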